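-- pv_equiv track=rewrite | github.com/noegomviv/Ejercicios-Python-noeliagv | ejercicio5.py | generarImpares
-- ===== SOURCE A (Python) =====
-- def esImpar(numero) :
--     resto = (numero % 2)
--     if resto !=0:
--         return True # --> Implemente código de la función <--
--     else:
--         return False
--
-- def generarImpares(valores, inicio) :
--     impares=[]
--     numero=inicio
--     contador=valores
--     while contador > 0 :
--         if esImpar(numero) :
--             impares.append(numero)
--             numero=numero+2
--             contador=contador-1
--         else :
--             numero=numero+1
--     # --> Complete código de la función <--
--
--     return impares
-- ===== SOURCE B (Python) =====
-- def generarImpares(valores, inicio):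
--     start = inicio if inicio % 2 != 0 else inicio + 1
--     return [start + 2 * i for i in range(valores)]
-- ===== Notes on version B (the rewrite author's own statement) =====
-- stated objective: simpler
-- what changed: Replaces the while loop with per-step parity tests and counter/number state by computing the first odd value once and emitting the arithmetic sequence start+2*i as a closed-form comprehension.
import Mathlib
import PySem

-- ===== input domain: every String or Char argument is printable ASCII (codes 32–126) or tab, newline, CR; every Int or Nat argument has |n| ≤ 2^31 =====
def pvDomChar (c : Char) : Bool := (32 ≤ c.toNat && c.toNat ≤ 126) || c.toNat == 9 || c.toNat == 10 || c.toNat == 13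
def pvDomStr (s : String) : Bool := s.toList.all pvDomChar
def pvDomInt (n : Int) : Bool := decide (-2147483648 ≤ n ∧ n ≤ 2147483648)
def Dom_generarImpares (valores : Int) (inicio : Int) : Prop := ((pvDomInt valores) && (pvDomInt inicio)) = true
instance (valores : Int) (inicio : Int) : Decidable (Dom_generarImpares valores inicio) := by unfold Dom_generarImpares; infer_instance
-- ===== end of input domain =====

-- B computes the first odd value once and returns the closed-form sequence start+2*i; simpler, no per-step parity tests.

-- ===== PORT A =====
-- Python's n % 2 (divisor positive) coincides with Lean's Int.emod; cited by the loop's termination proof.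
lemma pymod_two (n : Int) : PySem.Int.mod n 2 = n % 2 := by
  simp [PySem.Int.mod, Int.fmod_eq_emod]

def esImpar (numero : Int) : Bool :=
  if PySem.Int.mod numero 2 ≠ 0 then true else false

def generarImparesLoop (contador : Int) (numero : Int) (impares : List Int) : List Int :=
  if contador > 0 then
    if esImpar numero then
      generarImparesLoop (contador - 1) (numero + 2) (impares ++ [numero])
    else
      generarImparesLoop contador (numero + 1) impares
  else impares
termination_by 2 * contador.toNat + (if PySem.Int.mod numero 2 = 0 then 1 else 0)
decreasing_by
  all_goals simp [esImpar, pymod_two] at *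
  all_goals first
    | omega
    | (split_ifs at * <;> omega)

def generarImpares (valores : Int) (inicio : Int) : List Int :=
  generarImparesLoop valores inicio []

-- ===== PORT B =====
def generarImpares_alt (valores : Int) (inicio : Int) : List Int :=
  let start := if PySem.Int.mod inicio 2 ≠ 0 then inicio else inicio + 1
  (PySem.List.pyRange 0 valores 1).map (fun i => start + 2 * i)

-- ===== PRECONDITION & SPEC =====
def Spec_generarImpares (valores : Int) (inicio : Int) (out : List Int) : Prop := out = generarImpares_alt valores inicio
instance (valores : Int) (inicio : Int) (out : List Int) : Decidable (Spec_generarImpares valores inicio out) := by unfold Spec_generarImpares; infer_instance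

-- ===== CLAIM (what is proved, stated in full; the proofs are below) =====
def Claim_equal_generarImpares : Prop := ∀ (valores : Int) (inicio : Int), Dom_generarImpares valores inicio → Spec_generarImpares valores inicio (generarImpares valores inicio)

-- ===== LEMMAS AND PROOFS =====

-- A's loop, started at an odd number, emits exactly the arithmetic sequence n, n+2, …
lemma loop_odd (m : Nat) (n : Int) (acc : List Int) (hn : PySem.Int.mod n 2 ≠ 0) :
    generarImparesLoop (m : Int) n acc = acc ++ (List.range m).map (fun (k : Nat) => n + 2 * (k : Int)) := by
  induction m generalizing n acc with
  | zero => rw [generarImparesLoop]; simp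
  | succ m ih =>
      rw [generarImparesLoop]
      have hb : esImpar n = true := by rw [esImpar]; exact if_pos hn
      have hpos : ((m : Int) + 1 > 0) := by positivity
      have h2 : PySem.Int.mod (n + 2) 2 ≠ 0 := by
        rw [pymod_two] at hn ⊢; omega
      push_cast
      rw [if_pos hpos, if_pos hb, add_sub_cancel_right, ih (n + 2) (acc ++ [n]) h2,
        List.range_succ_eq_map]
      simp only [List.map_cons, List.map_map, Nat.cast_zero, mul_zero, add_zero,
        List.append_assoc, List.cons_append, List.nil_append, List.singleton_append]
      congr 1
      congr 1
      apply List.map_congr_left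
      intro k _
      simp only [Function.comp_apply, Nat.succ_eq_add_one]
      push_cast
      ring

lemma loop_even_step (c : Int) (n : Int) (hc : c > 0) (hn : PySem.Int.mod n 2 = 0) (acc : List Int) :
    generarImparesLoop c n acc = generarImparesLoop c (n + 1) acc := by
  have hb : esImpar n = false := by rw [esImpar]; exact if_neg (not_not_intro hn)
  rw [generarImparesLoop, if_pos hc, hb]
  simp

lemma alt_eq (valores : Int) (start : Int) :
    (PySem.List.pyRange 0 valores 1).map (fun i => start + 2 * i)
      = (List.range valores.toNat).map (fun (k : Nat) => start + 2 * (k : Int)) := by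
  rw [PySem.List.pyRange_one, List.map_map]
  simp only [sub_zero]
  apply List.map_congr_left
  intro k _
  simp

-- ===== VERDICT (by name: the statement is the Claim_ definition above) =====
theorem generarImpares_spec : Claim_equal_generarImpares := by
  intro valores inicio _
  unfold Spec_generarImpares generarImpares generarImpares_alt
  by_cases hodd : PySem.Int.mod inicio 2 ≠ 0
  · rw [if_pos hodd, alt_eq]
    rcases le_or_gt valores 0 with hv | hv
    · rw [generarImparesLoop]
      simp [not_lt.mpr hv, Int.toNat_of_nonpos hv]
    · have := loop_odd valores.toNat inicio [] hodd
      rwa [Int.toNat_of_nonneg (le_of_lt hv)] at this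
  · rw [not_not] at hodd
    rw [if_neg (not_not_intro hodd), alt_eq]
    rcases le_or_gt valores 0 with hv | hv
    · rw [generarImparesLoop]
      simp [not_lt.mpr hv, Int.toNat_of_nonpos hv]
    · have hn1 : PySem.Int.mod (inicio + 1) 2 ≠ 0 := by
        rw [pymod_two] at hodd ⊢; omega
      rw [loop_even_step valores inicio hv hodd]
      have := loop_odd valores.toNat (inicio + 1) [] hn1
      rwa [Int.toNat_of_nonneg (le_of_lt hv)] at this
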